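-- pv_equiv track=rewrite | github.com/JadKaedBey/OperativoDataImportConsole | marcolin/marcolin_pyqt_console.py | get_graph_layers_from_end
-- ===== SOURCE A (Python) =====
-- def get_graph_layers_from_end(graph, reverse_graph):
--     local_reverse_graph = reverse_graph.copy()
--     layers = []
--     visited = set()
--     queue = []
--
--     # Identify all end nodes (nodes with no outgoing edges)
--     for node_id, edges in graph.items():
--         if not edges:
--             queue.append(node_id)
--             visited.add(node_id)
--
--     # Start from end nodes and traverse backwards
--     while queue:
--         current_layer = []
--         layer_size = len(queue)
--
--         for _ in range(layer_size):
--             node_id = queue.pop(0)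
--             current_layer.append(node_id)
--
--             # Traverse to all nodes pointing to the current node (predecessors)
--             if node_id in local_reverse_graph:
--                 for predecessor in local_reverse_graph[node_id]:
--                     if predecessor not in visited:
--                         queue.append(predecessor)
--                         visited.add(predecessor)
--
--         layers.insert(0, current_layer)
--
--     return layers
-- ===== SOURCE B (Python) =====
-- def get_graph_layers_from_end(graph, reverse_graph):
--     local_reverse_graph = reverse_graph.copy()
--     # single BFS: order = nodes in discovery order, dist = level of each node
--     order = []
--     dist = {}
--     for node_id, edges in graph.items():
--         if not edges:
--             order.append(node_id)
--             dist[node_id] = 0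
--     i = 0
--     while i < len(order):
--         node_id = order[i]
--         i += 1
--         if node_id in local_reverse_graph:
--             for predecessor in local_reverse_graph[node_id]:
--                 if predecessor not in dist:
--                     order.append(predecessor)
--                     dist[predecessor] = dist[node_id] + 1
--     if not order:
--         return []
--     maxlevel = dist[order[-1]]
--     return [[n for n in order if dist[n] == level]
--             for level in range(maxlevel, -1, -1)]
-- ===== Notes on version B (the rewrite author's own statement) =====
-- stated objective: alternative
-- what changed: Replaces the round-by-round frontier batching (len(queue) snapshot, pop(0), insert(0, layer)) by a single index-scan BFS that records each node's level in a dist table, then rebuilds the layers by grouping the discovery order by level from maxlevel down to 0.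
import Mathlib
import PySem

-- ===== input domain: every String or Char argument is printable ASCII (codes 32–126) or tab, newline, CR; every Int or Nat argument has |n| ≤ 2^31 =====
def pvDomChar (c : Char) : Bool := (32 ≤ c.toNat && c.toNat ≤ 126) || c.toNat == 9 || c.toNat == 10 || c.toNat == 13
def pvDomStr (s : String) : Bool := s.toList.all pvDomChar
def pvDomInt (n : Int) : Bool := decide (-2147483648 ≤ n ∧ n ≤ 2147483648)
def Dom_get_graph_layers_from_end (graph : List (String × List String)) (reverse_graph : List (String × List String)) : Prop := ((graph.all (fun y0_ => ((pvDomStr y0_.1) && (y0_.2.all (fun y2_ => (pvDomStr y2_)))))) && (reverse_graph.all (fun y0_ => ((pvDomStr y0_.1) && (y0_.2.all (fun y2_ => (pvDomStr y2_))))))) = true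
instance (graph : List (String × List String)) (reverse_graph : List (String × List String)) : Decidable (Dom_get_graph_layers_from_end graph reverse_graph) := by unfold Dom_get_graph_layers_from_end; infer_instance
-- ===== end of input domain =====

-- B replaces A's frontier-batched BFS (len(queue) snapshot, pop(0), insert(0, layer)) by a single
-- index-scan BFS recording each node's level in a dist table, then regroups the discovery order by
-- level from maxlevel down to 0; the return values are proved equal.

-- ── shared termination infrastructure (cited by the ports' decreasing_by) ──

/-- Every node name that can ever be appended to the queue: a value entry of reverse_graph. -/
def pvCand (rg : PySem.Dict String (List String)) : List String :=
  PySem.List.dedup (rg.values.flatten)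

def pvUnvisA (rg : PySem.Dict String (List String)) (v : PySem.Set String) : Nat :=
  ((pvCand rg).filter (fun p => !(PySem.Set.contains v p))).length

def pvUnvisB (rg : PySem.Dict String (List String)) (dist : PySem.Dict String Nat) : Nat :=
  ((pvCand rg).filter (fun p => !(PySem.Dict.contains dist p))).length

theorem pvFilter_mono {α : Type} (l : List α) (p q : α → Bool)
    (h : ∀ x ∈ l, q x = true → p x = true) :
    (l.filter q).length ≤ (l.filter p).length := by
  induction l with
  | nil => simp
  | cons a t ih =>
    have ht : ∀ x ∈ t, q x = true → p x = true := fun x hx => h x (List.mem_cons_of_mem _ hx)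
    by_cases hq : q a = true
    · have hp : p a = true := h a List.mem_cons_self hq
      simpa [List.filter_cons, hq, hp] using ih ht
    · have hq' : q a = false := by simpa using hq
      by_cases hp : p a = true
      · simp only [List.filter_cons, hq', hp]
        simp only [Bool.false_eq_true, if_false, if_true, List.length_cons]
        exact Nat.le_succ_of_le (ih ht)
      · have hp' : p a = false := by simpa using hp
        simpa [List.filter_cons, hq', hp'] using ih ht

theorem pvFilter_strict {α : Type} (l : List α) (p q : α → Bool) (x : α)
    (hx : x ∈ l) (hpx : p x = true) (hqx : q x = false)
    (h : ∀ y ∈ l, q y = true → p y = true) :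
    (l.filter q).length < (l.filter p).length := by
  induction l with
  | nil => cases hx
  | cons a t ih =>
    have ht : ∀ y ∈ t, q y = true → p y = true := fun y hy => h y (List.mem_cons_of_mem _ hy)
    rcases List.mem_cons.mp hx with rfl | hxt
    · simp only [List.filter_cons, hqx, hpx, Bool.false_eq_true, if_false, if_true,
        List.length_cons]
      exact Nat.lt_succ_of_le (pvFilter_mono t p q ht)
    · by_cases hq : q a = true
      · have hp : p a = true := h a List.mem_cons_self hq
        simpa [List.filter_cons, hq, hp] using ih hxt ht
      · have hq' : q a = false := by simpa using hq
        by_cases hp : p a = true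
        · simp only [List.filter_cons, hq', hp, Bool.false_eq_true, if_false, if_true,
            List.length_cons]
          exact Nat.lt_succ_of_lt (ih hxt ht)
        · have hp' : p a = false := by simpa using hp
          simpa [List.filter_cons, hq', hp'] using ih hxt ht

-- ===== PORT A =====

/-- inner loop of A: `for predecessor in preds: if predecessor not in visited: queue.append; visited.add` -/
def pvAInner (newq : List String) (v : PySem.Set String) (preds : List String) :
    List String × PySem.Set String :=
  preds.foldl
    (fun st p => if PySem.Set.contains st.2 p then st else (st.1 ++ [p], PySem.Set.add st.2 p))
    (newq, v)

/-- one round of A's while loop: `for _ in range(layer_size)` popping nodes, building `current_layer` and the next queue -/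
def pvARound (rg : PySem.Dict String (List String)) :
    List String → List String → List String → PySem.Set String →
    List String × List String × PySem.Set String
  | [], layer, newq, v => (layer, newq, v)
  | n :: rest, layer, newq, v =>
    match PySem.Dict.get? rg n with
    | none => pvARound rg rest (layer ++ [n]) newq v
    | some preds =>
      let st := pvAInner newq v preds
      pvARound rg rest (layer ++ [n]) st.1 st.2

theorem pvAInner_cons_skip {p : String} {t newq : List String} {v : PySem.Set String}
    (hc : PySem.Set.contains v p = true) :
    pvAInner newq v (p :: t) = pvAInner newq v t := by
  have hm : p ∈ v := (PySem.Set.contains_iff v p).mp hc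
  simp [pvAInner, hm]

theorem pvAInner_cons_add {p : String} {t newq : List String} {v : PySem.Set String}
    (hc : PySem.Set.contains v p = false) :
    pvAInner newq v (p :: t) = pvAInner (newq ++ [p]) (PySem.Set.add v p) t := by
  have hm : p ∉ v := fun hm => by rw [(PySem.Set.contains_iff v p).mpr hm] at hc; cases hc
  simp [pvAInner, hm]

theorem pvAInner_mono (preds : List String) : ∀ (newq : List String) (v : PySem.Set String),
    ∀ x ∈ v, x ∈ (pvAInner newq v preds).2 := by
  induction preds with
  | nil => intro newq v x hx; simpa [pvAInner] using hx
  | cons p t ih =>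
    intro newq v x hx
    cases hc : PySem.Set.contains v p
    · rw [pvAInner_cons_add hc]
      exact ih _ _ x ((PySem.Set.mem_add v p x).mpr (Or.inl hx))
    · rw [pvAInner_cons_skip hc]
      exact ih _ _ x hx

theorem pvAInner_new (preds : List String) : ∀ (newq : List String) (v : PySem.Set String),
    ∀ x ∈ (pvAInner newq v preds).1, x ∈ newq ∨
      (x ∈ preds ∧ x ∉ v ∧ x ∈ (pvAInner newq v preds).2) := by
  induction preds with
  | nil => intro newq v x hx; exact Or.inl (by simpa [pvAInner] using hx)
  | cons p t ih =>
    intro newq v x hx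
    cases hc : PySem.Set.contains v p
    · rw [pvAInner_cons_add hc] at hx ⊢
      rcases ih _ _ x hx with h | ⟨h1, h2, h3⟩
      · rcases List.mem_append.mp h with h' | h'
        · exact Or.inl h'
        · have hxp : x = p := by simpa using h'
          subst hxp
          refine Or.inr ⟨List.mem_cons_self, ?_, ?_⟩
          · intro hv; rw [(PySem.Set.contains_iff v x).mpr hv] at hc; cases hc
          · exact pvAInner_mono t _ _ x ((PySem.Set.mem_add v x x).mpr (Or.inr rfl))
      · refine Or.inr ⟨List.mem_cons_of_mem _ h1, ?_, h3⟩
        intro hv; exact h2 ((PySem.Set.mem_add v p x).mpr (Or.inl hv))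
    · rw [pvAInner_cons_skip hc] at hx ⊢
      rcases ih _ _ x hx with h | ⟨h1, h2, h3⟩
      · exact Or.inl h
      · exact Or.inr ⟨List.mem_cons_of_mem _ h1, h2, h3⟩

theorem pvMem_cand {rg : PySem.Dict String (List String)} {n : String} {preds : List String}
    (hg : PySem.Dict.get? rg n = some preds) : ∀ p ∈ preds, p ∈ pvCand rg := by
  intro x hx
  have hm : (n, preds) ∈ rg.items := PySem.Dict.mem_items_of_get?_eq_some rg hg
  have hv : preds ∈ rg.values := by
    simp only [PySem.Dict.values]
    exact List.mem_map.mpr ⟨(n, preds), hm, rfl⟩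
  rw [pvCand, PySem.List.mem_dedup]
  exact List.mem_flatten.mpr ⟨preds, hv, hx⟩

theorem pvARound_mono (rg : PySem.Dict String (List String)) (nodes : List String) :
    ∀ (layer newq : List String) (v : PySem.Set String),
    ∀ x ∈ v, x ∈ (pvARound rg nodes layer newq v).2.2 := by
  induction nodes with
  | nil => intro layer newq v x hx; simpa [pvARound] using hx
  | cons n rest ih =>
    intro layer newq v x hx
    cases hg : PySem.Dict.get? rg n with
    | none => rw [show pvARound rg (n :: rest) layer newq v
          = pvARound rg rest (layer ++ [n]) newq v by simp [pvARound, hg]]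
              exact ih _ _ _ x hx
    | some preds =>
      rw [show pvARound rg (n :: rest) layer newq v
          = pvARound rg rest (layer ++ [n]) (pvAInner newq v preds).1 (pvAInner newq v preds).2
          by simp [pvARound, hg]]
      exact ih _ _ _ x (pvAInner_mono preds newq v x hx)

theorem pvARound_new (rg : PySem.Dict String (List String)) (nodes : List String) :
    ∀ (layer newq : List String) (v : PySem.Set String),
    ∀ x ∈ (pvARound rg nodes layer newq v).2.1, x ∈ newq ∨
      (x ∈ pvCand rg ∧ x ∉ v ∧ x ∈ (pvARound rg nodes layer newq v).2.2) := by
  induction nodes with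
  | nil => intro layer newq v x hx; exact Or.inl (by simpa [pvARound] using hx)
  | cons n rest ih =>
    intro layer newq v x hx
    cases hg : PySem.Dict.get? rg n with
    | none =>
      rw [show pvARound rg (n :: rest) layer newq v
          = pvARound rg rest (layer ++ [n]) newq v by simp [pvARound, hg]] at hx ⊢
      exact ih _ _ _ x hx
    | some preds =>
      rw [show pvARound rg (n :: rest) layer newq v
          = pvARound rg rest (layer ++ [n]) (pvAInner newq v preds).1 (pvAInner newq v preds).2
          by simp [pvARound, hg]] at hx ⊢
      rcases ih _ _ _ x hx with h | ⟨h1, h2, h3⟩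
      · rcases pvAInner_new preds newq v x h with h' | ⟨h1, h2, h3⟩
        · exact Or.inl h'
        · exact Or.inr ⟨pvMem_cand hg x h1, h2,
            pvARound_mono rg rest _ _ _ x h3⟩
      · refine Or.inr ⟨h1, fun hv => h2 (pvAInner_mono preds newq v x hv), h3⟩

/-- A's `while queue:` loop; layers are accumulated front-first via `layers.insert(0, …)`. -/
def pvALoop (rg : PySem.Dict String (List String)) (q : List String) (v : PySem.Set String) :
    List (List String) :=
  if h : q = [] then []
  else
    let r := pvARound rg q [] [] v
    pvALoop rg r.2.1 r.2.2 ++ [r.1]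
  termination_by pvUnvisA rg v + (if q = [] then 0 else 1)
  decreasing_by
    have hmono : pvUnvisA rg (pvARound rg q [] [] v).2.2 ≤ pvUnvisA rg v := by
      apply pvFilter_mono
      intro x _ hx
      simp only [Bool.not_eq_true'] at hx ⊢
      cases hv : PySem.Set.contains v x
      · rfl
      · have : x ∈ (pvARound rg q [] [] v).2.2 :=
          pvARound_mono rg q [] [] v x ((PySem.Set.contains_iff v x).mp hv)
        rw [(PySem.Set.contains_iff _ x).mpr this] at hx; cases hx
    have hstrict : (pvARound rg q [] [] v).2.1 ≠ [] →
        pvUnvisA rg (pvARound rg q [] [] v).2.2 < pvUnvisA rg v := by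
      intro hq
      rcases List.exists_mem_of_ne_nil _ hq with ⟨x, hx⟩
      rcases pvARound_new rg q [] [] v x hx with h' | ⟨h1, h2, h3⟩
      · cases h'
      · apply pvFilter_strict _ _ _ x h1
        · simp only [Bool.not_eq_true']
          cases hv : PySem.Set.contains v x
          · rfl
          · exact absurd ((PySem.Set.contains_iff v x).mp hv) h2
        · simp only [Bool.not_eq_false']
          exact (PySem.Set.contains_iff _ x).mpr h3
        · intro y _ hy
          simp only [Bool.not_eq_true'] at hy ⊢
          cases hv : PySem.Set.contains v y
          · rfl
          · have : y ∈ (pvARound rg q [] [] v).2.2 :=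
              pvARound_mono rg q [] [] v y ((PySem.Set.contains_iff v y).mp hv)
            rw [(PySem.Set.contains_iff _ y).mpr this] at hy; cases hy
    rw [if_neg h]
    by_cases hq : (pvARound rg q [] [] v).2.1 = []
    · rw [if_pos hq]; omega
    · rw [if_neg hq]; have := hstrict hq; omega

def get_graph_layers_from_end (graph : List (String × List String))
    (reverse_graph : List (String × List String)) : List (List String) :=
  let local_reverse_graph : PySem.Dict String (List String) := PySem.Dict.mk reverse_graph
  -- `for node_id, edges in graph.items(): if not edges: queue.append(node_id); visited.add(node_id)`
  let init := graph.foldl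
    (fun (st : List String × PySem.Set String) nd =>
      if nd.2.isEmpty then (st.1 ++ [nd.1], PySem.Set.add st.2 nd.1) else st)
    ([], PySem.Set.empty)
  pvALoop local_reverse_graph init.1 init.2

-- ===== PORT B =====

/-- inner loop of B: `for predecessor in preds: if predecessor not in dist: order.append; dist[predecessor] = dist[node_id] + 1` -/
def pvBFold (n : String) (preds : List String) (st0 : List String × PySem.Dict String Nat) :
    List String × PySem.Dict String Nat :=
  preds.foldl
    (fun st p => if PySem.Dict.contains st.2 p then st
      else (st.1 ++ [p], PySem.Dict.insert st.2 p (PySem.Dict.getD st.2 n 0 + 1)))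
    st0
    -- `dist[node_id]`: node_id is always a key of dist here, so `getD _ _ 0` is exact

theorem pvBFold_spec (rg : PySem.Dict String (List String)) (n : String) (preds : List String)
    (hpre : ∀ p ∈ preds, p ∈ pvCand rg) :
    ∀ (acc : List String) (dist : PySem.Dict String Nat),
    (pvBFold n preds (acc, dist)).1.length + pvUnvisB rg (pvBFold n preds (acc, dist)).2 ≤
      acc.length + pvUnvisB rg dist := by
  induction preds with
  | nil => intro acc dist; simp [pvBFold]
  | cons p t ih =>
    intro acc dist
    have hpt : ∀ x ∈ t, x ∈ pvCand rg := fun x hx => hpre x (List.mem_cons_of_mem _ hx)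
    cases hc : PySem.Dict.contains dist p
    · have e : pvBFold n (p :: t) (acc, dist) =
          pvBFold n t (acc ++ [p], PySem.Dict.insert dist p (PySem.Dict.getD dist n 0 + 1)) := by
        simp [pvBFold, hc]
      rw [e]
      have hdec : pvUnvisB rg (PySem.Dict.insert dist p (PySem.Dict.getD dist n 0 + 1)) <
          pvUnvisB rg dist := by
        apply pvFilter_strict _ _ _ p (hpre p List.mem_cons_self)
        · simp [hc]
        · simp [PySem.Dict.contains_insert]
        · intro y _ hy
          simp only [Bool.not_eq_true'] at hy ⊢
          rw [PySem.Dict.contains_insert] at hy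
          cases hd : PySem.Dict.contains dist y
          · rfl
          · simp [hd] at hy
      have := ih hpt (acc ++ [p]) (PySem.Dict.insert dist p (PySem.Dict.getD dist n 0 + 1))
      simp only [List.length_append, List.length_cons, List.length_nil] at this ⊢
      omega
    · have e : pvBFold n (p :: t) (acc, dist) = pvBFold n t (acc, dist) := by
        simp [pvBFold, hc]
      rw [e]; exact ih hpt acc dist

/-- B's `while i < len(order):` index scan; the state is the unprocessed suffix `order[i:]` and dist. -/
def pvBScan (rg : PySem.Dict String (List String)) :
    List String → PySem.Dict String Nat → List String × PySem.Dict String Nat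
  | [], dist => ([], dist)
  | n :: rest, dist =>
    match hg : PySem.Dict.get? rg n with
    | none =>
      let r := pvBScan rg rest dist
      (n :: r.1, r.2)
    | some preds =>
      let st := pvBFold n preds ([], dist)
      let r := pvBScan rg (rest ++ st.1) st.2
      (n :: r.1, r.2)
  termination_by todo dist => todo.length + pvUnvisB rg dist
  decreasing_by
    · simp only [List.length_cons]; omega
    · have := pvBFold_spec rg n preds (pvMem_cand hg) [] dist
      simp only [List.length_nil, List.length_append, List.length_cons] at this ⊢
      omega

def get_graph_layers_from_end_alt (graph : List (String × List String))
    (reverse_graph : List (String × List String)) : List (List String) :=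
  let local_reverse_graph : PySem.Dict String (List String) := PySem.Dict.mk reverse_graph
  let init := graph.foldl
    (fun (st : List String × PySem.Dict String Nat) nd =>
      if nd.2.isEmpty then (st.1 ++ [nd.1], PySem.Dict.insert st.2 nd.1 0) else st)
    ([], PySem.Dict.empty)
  let r := pvBScan local_reverse_graph init.1 init.2
  let order := r.1
  let dist := r.2
  if order.isEmpty then []
  else
    -- `dist[order[-1]]`: order is nonempty here and its last element is a key of dist
    let maxlevel := PySem.Dict.getD dist (order.getLast?.getD "") 0
    -- `range(maxlevel, -1, -1)` with maxlevel a natural number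
    ((List.range (maxlevel + 1)).reverse).map
      (fun lvl => order.filter (fun nd => PySem.Dict.getD dist nd 0 == lvl))

-- ===== PRECONDITION & SPEC =====
def Spec_get_graph_layers_from_end (graph : List (String × List String)) (reverse_graph : List (String × List String)) (out : List (List String)) : Prop := out = get_graph_layers_from_end_alt graph reverse_graph
instance (graph : List (String × List String)) (reverse_graph : List (String × List String)) (out : List (List String)) : Decidable (Spec_get_graph_layers_from_end graph reverse_graph out) := by unfold Spec_get_graph_layers_from_end; infer_instance

-- ===== CLAIM (what is proved, stated in full; the proofs are below) =====
def Claim_equal_get_graph_layers_from_end : Prop := ∀ (graph : List (String × List String)) (reverse_graph : List (String × List String)), Dom_get_graph_layers_from_end graph reverse_graph → Spec_get_graph_layers_from_end graph reverse_graph (get_graph_layers_from_end graph reverse_graph)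

-- ===== LEMMAS AND PROOFS =====

/-- the visited set and the key set of the dist table coincide -/
def pvInv (v : PySem.Set String) (dist : PySem.Dict String Nat) : Prop :=
  ∀ x, x ∈ v ↔ PySem.Dict.contains dist x = true

/-- d' agrees with d on all keys of d -/
def pvExt (d d' : PySem.Dict String Nat) : Prop :=
  ∀ x, PySem.Dict.contains d x = true → PySem.Dict.get? d' x = PySem.Dict.get? d x

theorem pvExt_refl (d : PySem.Dict String Nat) : pvExt d d := fun _ _ => rfl

theorem pvExt_contains {d d' : PySem.Dict String Nat} (h : pvExt d d') {x : String}
    (hx : PySem.Dict.contains d x = true) : PySem.Dict.contains d' x = true := by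
  rw [PySem.Dict.contains_eq_isSome_get?] at hx ⊢
  rw [h x (by rw [PySem.Dict.contains_eq_isSome_get?]; exact hx)]
  exact hx

theorem pvExt_trans {d1 d2 d3 : PySem.Dict String Nat} (h12 : pvExt d1 d2) (h23 : pvExt d2 d3) :
    pvExt d1 d3 := by
  intro x hx
  rw [h23 x (pvExt_contains h12 hx), h12 x hx]

theorem pvContains_of_get? {d : PySem.Dict String Nat} {x : String} {m : Nat}
    (h : PySem.Dict.get? d x = some m) : PySem.Dict.contains d x = true := by
  rw [PySem.Dict.contains_eq_isSome_get?, h]; rfl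

theorem pvExt_get? {d d' : PySem.Dict String Nat} (h : pvExt d d') {x : String} {m : Nat}
    (hx : PySem.Dict.get? d x = some m) : PySem.Dict.get? d' x = some m := by
  rw [h x (pvContains_of_get? hx)]; exact hx

-- accumulator extraction
theorem pvAInner_append (preds : List String) : ∀ (newq : List String) (v : PySem.Set String),
    pvAInner newq v preds = (newq ++ (pvAInner [] v preds).1, (pvAInner [] v preds).2) := by
  induction preds with
  | nil => intro newq v; simp [pvAInner]
  | cons p t ih =>
    intro newq v
    cases hc : PySem.Set.contains v p
    · rw [pvAInner_cons_add hc, pvAInner_cons_add hc, ih, ih ([] ++ [p])]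
      simp
    · rw [pvAInner_cons_skip hc, pvAInner_cons_skip hc, ih]

theorem pvBFold_cons_skip {n p : String} {t acc : List String} {dist : PySem.Dict String Nat}
    (hc : PySem.Dict.contains dist p = true) :
    pvBFold n (p :: t) (acc, dist) = pvBFold n t (acc, dist) := by
  simp [pvBFold, hc]

theorem pvBFold_cons_add {n p : String} {t acc : List String} {dist : PySem.Dict String Nat}
    (hc : PySem.Dict.contains dist p = false) :
    pvBFold n (p :: t) (acc, dist) =
      pvBFold n t (acc ++ [p], PySem.Dict.insert dist p (PySem.Dict.getD dist n 0 + 1)) := by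
  simp [pvBFold, hc]

theorem pvBFold_append (n : String) (preds : List String) :
    ∀ (acc : List String) (dist : PySem.Dict String Nat),
    pvBFold n preds (acc, dist) =
      (acc ++ (pvBFold n preds ([], dist)).1, (pvBFold n preds ([], dist)).2) := by
  induction preds with
  | nil => intro acc dist; simp [pvBFold]
  | cons p t ih =>
    intro acc dist
    cases hc : PySem.Dict.contains dist p
    · rw [pvBFold_cons_add hc, pvBFold_cons_add hc, ih, ih ([] ++ [p])]
      simp
    · rw [pvBFold_cons_skip hc, pvBFold_cons_skip hc, ih]

theorem pvARound_cons_none {rg : PySem.Dict String (List String)} {n : String}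
    {rest layer newq : List String} {v : PySem.Set String}
    (hg : PySem.Dict.get? rg n = none) :
    pvARound rg (n :: rest) layer newq v = pvARound rg rest (layer ++ [n]) newq v := by
  simp [pvARound, hg]

theorem pvARound_cons_some {rg : PySem.Dict String (List String)} {n : String}
    {rest layer newq : List String} {v : PySem.Set String} {preds : List String}
    (hg : PySem.Dict.get? rg n = some preds) :
    pvARound rg (n :: rest) layer newq v =
      pvARound rg rest (layer ++ [n]) (pvAInner newq v preds).1 (pvAInner newq v preds).2 := by
  simp [pvARound, hg]

theorem pvARound_layer (rg : PySem.Dict String (List String)) (nodes : List String) :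
    ∀ (layer newq : List String) (v : PySem.Set String),
    (pvARound rg nodes layer newq v).1 = layer ++ nodes := by
  induction nodes with
  | nil => intro layer newq v; simp [pvARound]
  | cons n rest ih =>
    intro layer newq v
    cases hg : PySem.Dict.get? rg n with
    | none => rw [pvARound_cons_none hg, ih]; simp
    | some preds => rw [pvARound_cons_some hg, ih]; simp

theorem pvARound_snd (rg : PySem.Dict String (List String)) (nodes : List String) :
    ∀ (layer newq : List String) (v : PySem.Set String),
    (pvARound rg nodes layer newq v).2 =
      (newq ++ (pvARound rg nodes [] [] v).2.1, (pvARound rg nodes [] [] v).2.2) := by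
  induction nodes with
  | nil => intro layer newq v; simp [pvARound]
  | cons n rest ih =>
    intro layer newq v
    cases hg : PySem.Dict.get? rg n with
    | none =>
      rw [pvARound_cons_none hg, pvARound_cons_none hg, ih, ih ([] ++ [n]) []]
      simp
    | some preds =>
      rw [pvARound_cons_some hg, pvARound_cons_some hg, ih,
        ih ([] ++ [n]) (pvAInner [] v preds).1, pvAInner_append]
      simp

theorem pvInv_contains {v : PySem.Set String} {dist : PySem.Dict String Nat}
    (h : pvInv v dist) (p : String) :
    PySem.Set.contains v p = PySem.Dict.contains dist p := by
  cases hd : PySem.Dict.contains dist p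
  · cases hs : PySem.Set.contains v p
    · rfl
    · have := (h p).mp ((PySem.Set.contains_iff v p).mp hs)
      rw [hd] at this; cases this
  · exact (PySem.Set.contains_iff v p).mpr ((h p).mpr hd)

-- the two inner predecessor folds agree
theorem pvInner_equiv (preds : List String) :
    ∀ (v : PySem.Set String) (dist : PySem.Dict String Nat) (n : String) (l : Nat),
    pvInv v dist → PySem.Dict.get? dist n = some l →
    (pvBFold n preds ([], dist)).1 = (pvAInner [] v preds).1 ∧
    pvInv (pvAInner [] v preds).2 (pvBFold n preds ([], dist)).2 ∧
    pvExt dist (pvBFold n preds ([], dist)).2 ∧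
    (∀ x ∈ (pvAInner [] v preds).1,
      PySem.Dict.get? (pvBFold n preds ([], dist)).2 x = some (l + 1)) := by
  induction preds with
  | nil =>
    intro v dist n l hinv hn
    refine ⟨rfl, hinv, pvExt_refl dist, ?_⟩
    intro x hx; simp [pvAInner] at hx
  | cons p t ih =>
    intro v dist n l hinv hn
    have hvb := pvInv_contains hinv p
    cases hc : PySem.Dict.contains dist p
    · have hv : PySem.Set.contains v p = false := by rw [hvb, hc]
      have hgd : PySem.Dict.getD dist n 0 = l := by
        rw [PySem.Dict.getD_eq_get?_getD, hn]; rfl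
      rw [pvBFold_cons_add hc, pvAInner_cons_add hv, hgd]
      have hnp : n ≠ p := by
        intro e; subst e; rw [pvContains_of_get? hn] at hc; cases hc
      have hinv' : pvInv (PySem.Set.add v p) (PySem.Dict.insert dist p (l + 1)) := by
        intro x
        rw [PySem.Set.mem_add, PySem.Dict.contains_insert]
        constructor
        · rintro (hx | rfl)
          · simp [(hinv x).mp hx]
          · simp
        · intro hx
          simp only [Bool.or_eq_true, beq_iff_eq] at hx
          rcases hx with rfl | hx
          · exact Or.inr rfl
          · exact Or.inl ((hinv x).mpr hx)
      have hn' : PySem.Dict.get? (PySem.Dict.insert dist p (l + 1)) n = some l := by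
        rw [PySem.Dict.get?_insert_of_ne dist (l + 1) hnp, hn]
      obtain ⟨e1, e2, e3, e4⟩ := ih (PySem.Set.add v p) (PySem.Dict.insert dist p (l + 1)) n l hinv' hn'
      have hextd : pvExt dist (PySem.Dict.insert dist p (l + 1)) := by
        intro x hx
        have hxp : x ≠ p := by intro e; subst e; rw [hc] at hx; cases hx
        rw [PySem.Dict.get?_insert_of_ne dist (l + 1) hxp]
      rw [pvBFold_append, pvAInner_append]
      refine ⟨by simp [e1], by simpa using e2, pvExt_trans hextd e3, ?_⟩
      intro x hx
      have hx2 : x = p ∨ x ∈ (pvAInner [] (PySem.Set.add v p) t).1 := by simpa using hx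
      rcases hx2 with rfl | hx'
      · exact pvExt_get? e3 (PySem.Dict.get?_insert_self dist x (l + 1))
      · exact e4 x hx'
    · have hv : PySem.Set.contains v p = true := by rw [hvb, hc]
      rw [pvBFold_cons_skip hc, pvAInner_cons_skip hv]
      exact ih v dist n l hinv hn

theorem pvBScan_nil (rg : PySem.Dict String (List String)) (dist : PySem.Dict String Nat) :
    pvBScan rg [] dist = ([], dist) := by
  rw [pvBScan]

theorem pvBScan_cons_none {rg : PySem.Dict String (List String)} {n : String}
    {rest : List String} {dist : PySem.Dict String Nat}
    (hg : PySem.Dict.get? rg n = none) :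
    pvBScan rg (n :: rest) dist = (n :: (pvBScan rg rest dist).1, (pvBScan rg rest dist).2) := by
  rw [pvBScan]
  split
  next => rfl
  next h => rw [hg] at h; cases h

theorem pvBScan_cons_some {rg : PySem.Dict String (List String)} {n : String}
    {rest : List String} {dist : PySem.Dict String Nat} {preds : List String}
    (hg : PySem.Dict.get? rg n = some preds) :
    pvBScan rg (n :: rest) dist =
      (n :: (pvBScan rg (rest ++ (pvBFold n preds ([], dist)).1) (pvBFold n preds ([], dist)).2).1,
       (pvBScan rg (rest ++ (pvBFold n preds ([], dist)).1) (pvBFold n preds ([], dist)).2).2) := by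
  rw [pvBScan]
  split
  next h => rw [hg] at h; cases h
  next h => rw [hg] at h; injection h with h; subst h; rfl

theorem pvALoop_nil (rg : PySem.Dict String (List String)) (v : PySem.Set String) :
    pvALoop rg [] v = [] := by
  rw [pvALoop]; simp

theorem pvALoop_ne {rg : PySem.Dict String (List String)} {q : List String}
    {v : PySem.Set String} (h : q ≠ []) :
    pvALoop rg q v = pvALoop rg (pvARound rg q [] [] v).2.1 (pvARound rg q [] [] v).2.2 ++
      [(pvARound rg q [] [] v).1] := by
  rw [pvALoop]; simp [h]

-- one layer of A corresponds to a contiguous run of B's scan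
theorem pvLayer_equiv (rg : PySem.Dict String (List String)) (nodes : List String) :
    ∀ (pending : List String) (v : PySem.Set String) (dist : PySem.Dict String Nat) (l : Nat),
    pvInv v dist → (∀ x ∈ nodes, PySem.Dict.get? dist x = some l) →
    ∃ dist1,
      pvBScan rg (nodes ++ pending) dist =
        (nodes ++ (pvBScan rg (pending ++ (pvARound rg nodes [] [] v).2.1) dist1).1,
         (pvBScan rg (pending ++ (pvARound rg nodes [] [] v).2.1) dist1).2) ∧
      pvInv (pvARound rg nodes [] [] v).2.2 dist1 ∧ pvExt dist dist1 ∧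
      (∀ x ∈ (pvARound rg nodes [] [] v).2.1, PySem.Dict.get? dist1 x = some (l + 1)) := by
  induction nodes with
  | nil =>
    intro pending v dist l hinv _
    refine ⟨dist, ?_, ?_, pvExt_refl dist, ?_⟩
    · simp [pvARound]
    · simpa [pvARound] using hinv
    · intro x hx; simp [pvARound] at hx
  | cons n rest ih =>
    intro pending v dist l hinv hlev
    have hn := hlev n List.mem_cons_self
    cases hg : PySem.Dict.get? rg n with
    | none =>
      have hA : (pvARound rg (n :: rest) [] [] v).2 = (pvARound rg rest [] [] v).2 := by
        rw [pvARound_cons_none hg, pvARound_snd rg rest ([] ++ [n]) []]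
        simp
      obtain ⟨dist1, heq, hinv1, hext1, hlev1⟩ :=
        ih pending v dist l hinv (fun x hx => hlev x (List.mem_cons_of_mem _ hx))
      refine ⟨dist1, ?_, ?_, hext1, ?_⟩
      · rw [List.cons_append, pvBScan_cons_none hg, hA, heq]
        rfl
      · rw [hA]; exact hinv1
      · intro x hx; rw [hA] at hx; exact hlev1 x hx
    | some preds =>
      obtain ⟨e1, e2, e3, e4⟩ := pvInner_equiv preds v dist n l hinv hn
      have hA : (pvARound rg (n :: rest) [] [] v).2 =
          ((pvAInner [] v preds).1 ++ (pvARound rg rest [] [] (pvAInner [] v preds).2).2.1,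
           (pvARound rg rest [] [] (pvAInner [] v preds).2).2.2) := by
        rw [pvARound_cons_some hg, pvARound_snd]
      have hlevr : ∀ x ∈ rest, PySem.Dict.get? (pvBFold n preds ([], dist)).2 x = some l :=
        fun x hx => pvExt_get? e3 (hlev x (List.mem_cons_of_mem _ hx))
      obtain ⟨dist1, heq, hinv1, hext1, hlev1⟩ :=
        ih (pending ++ (pvAInner [] v preds).1) (pvAInner [] v preds).2
          (pvBFold n preds ([], dist)).2 l e2 hlevr
      refine ⟨dist1, ?_, ?_, pvExt_trans e3 hext1, ?_⟩
      · rw [List.cons_append, pvBScan_cons_some hg, e1, List.append_assoc, heq, hA]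
        simp [List.append_assoc]
      · rw [hA]; exact hinv1
      · intro x hx
        rw [hA] at hx
        rcases List.mem_append.mp hx with hx' | hx'
        · exact pvExt_get? hext1 (e4 x hx')
        · exact hlev1 x hx'

-- B's whole scan is the concatenation of A's layers in chronological order,
-- and dist records each layer's level
theorem pvMain (rg : PySem.Dict String (List String)) :
    ∀ (q : List String) (v : PySem.Set String) (dist : PySem.Dict String Nat) (l : Nat),
    pvInv v dist → (∀ x ∈ q, PySem.Dict.get? dist x = some l) →
    (pvBScan rg q dist).1 = (pvALoop rg q v).reverse.flatten ∧
    pvExt dist (pvBScan rg q dist).2 ∧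
    (∀ (j : Nat) (L : List String), (pvALoop rg q v).reverse[j]? = some L →
      ∀ x ∈ L, PySem.Dict.get? (pvBScan rg q dist).2 x = some (l + j)) ∧
    (∀ L ∈ pvALoop rg q v, L ≠ []) := by
  intro q v
  induction q, v using pvALoop.induct rg with
  | case1 v =>
    intro dist l hinv _
    rw [pvALoop_nil, pvBScan_nil]
    refine ⟨rfl, pvExt_refl dist, ?_, ?_⟩
    · intro j L hj; simp at hj
    · intro L hL; simp at hL
  | case2 q v hne r ih =>
    intro dist l hinv hlev
    have hr : r = pvARound rg q [] [] v := rfl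
    simp only [hr] at ih
    obtain ⟨dist1, heq, hinv1, hext1, hlev1⟩ := pvLayer_equiv rg q [] v dist l hinv hlev
    rw [List.append_nil, List.nil_append] at heq
    obtain ⟨m1, m2, m3, m4⟩ := ih dist1 (l + 1) hinv1 hlev1
    have hlayer : (pvARound rg q [] [] v).1 = q := by rw [pvARound_layer]; simp
    have hext : pvExt dist (pvBScan rg q dist).2 := by
      rw [heq]
      exact pvExt_trans hext1 m2
    refine ⟨?_, hext, ?_, ?_⟩
    · rw [heq, pvALoop_ne hne, hlayer, List.reverse_append]
      simp [m1]
    · intro j L hj x hx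
      rw [pvALoop_ne hne, hlayer, List.reverse_append] at hj
      simp only [List.reverse_cons, List.reverse_nil, List.nil_append, List.singleton_append] at hj
      cases j with
      | zero =>
        simp only [List.getElem?_cons_zero] at hj
        injection hj with hj; subst hj
        have := pvExt_get? hext (hlev x hx)
        rw [this]
        simp
      | succ j' =>
        simp only [List.getElem?_cons_succ] at hj
        have := m3 j' L hj x hx
        rw [heq]
        rw [this]
        congr 1
        omega
    · intro L hL
      rw [pvALoop_ne hne, hlayer] at hL
      rcases List.mem_append.mp hL with hL' | hL'
      · exact m4 L hL'
      · have : L = q := by simpa using hL'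
        rw [this]; exact hne

-- the two sink-detection folds agree
theorem pvInit_equiv (g : List (String × List String)) :
    ∀ (q : List String) (v : PySem.Set String) (dist : PySem.Dict String Nat),
    pvInv v dist → (∀ x ∈ q, PySem.Dict.get? dist x = some 0) →
    (g.foldl (fun (st : List String × PySem.Dict String Nat) nd =>
        if nd.2.isEmpty then (st.1 ++ [nd.1], PySem.Dict.insert st.2 nd.1 0) else st)
        (q, dist)).1 =
      (g.foldl (fun (st : List String × PySem.Set String) nd =>
        if nd.2.isEmpty then (st.1 ++ [nd.1], PySem.Set.add st.2 nd.1) else st) (q, v)).1 ∧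
    pvInv (g.foldl (fun (st : List String × PySem.Set String) nd =>
        if nd.2.isEmpty then (st.1 ++ [nd.1], PySem.Set.add st.2 nd.1) else st) (q, v)).2
      (g.foldl (fun (st : List String × PySem.Dict String Nat) nd =>
        if nd.2.isEmpty then (st.1 ++ [nd.1], PySem.Dict.insert st.2 nd.1 0) else st)
        (q, dist)).2 ∧
    (∀ x ∈ (g.foldl (fun (st : List String × PySem.Set String) nd =>
        if nd.2.isEmpty then (st.1 ++ [nd.1], PySem.Set.add st.2 nd.1) else st) (q, v)).1,
      PySem.Dict.get? (g.foldl (fun (st : List String × PySem.Dict String Nat) nd =>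
        if nd.2.isEmpty then (st.1 ++ [nd.1], PySem.Dict.insert st.2 nd.1 0) else st)
        (q, dist)).2 x = some 0) := by
  induction g with
  | nil =>
    intro q v dist hinv hq
    exact ⟨rfl, hinv, hq⟩
  | cons nd gt ih =>
    intro q v dist hinv hq
    rw [List.foldl_cons, List.foldl_cons]
    cases he : nd.2.isEmpty
    · simp only [he, Bool.false_eq_true, if_false]
      exact ih q v dist hinv hq
    · simp only [he, if_true]
      apply ih
      · intro x
        rw [PySem.Set.mem_add, PySem.Dict.contains_insert]
        constructor
        · rintro (hx | rfl)
          · simp [(hinv x).mp hx]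
          · simp
        · intro hx
          simp only [Bool.or_eq_true, beq_iff_eq] at hx
          rcases hx with rfl | hx
          · exact Or.inr rfl
          · exact Or.inl ((hinv x).mpr hx)
      · intro x hx
        rw [PySem.Dict.get?_insert]
        split
        · rfl
        · rcases List.mem_append.mp hx with h1 | h1
          · exact hq x h1
          · next hne => exact absurd (by simpa using h1) hne

-- filtering the flattened layers by level recovers each layer
theorem pvFilterFlatten (Ls : List (List String)) :
    ∀ (dF : PySem.Dict String Nat) (base : Nat),
    (∀ (j : Nat) (L : List String), Ls[j]? = some L →
      ∀ x ∈ L, PySem.Dict.get? dF x = some (base + j)) →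
    ∀ (t : Nat), t < Ls.length →
    Ls.flatten.filter (fun x => PySem.Dict.getD dF x 0 == (base + t)) = Ls.getD t [] := by
  induction Ls with
  | nil => intro dF base _ t ht; simp at ht
  | cons L rest ih =>
    intro dF base hlev t ht
    have hL : ∀ x ∈ L, PySem.Dict.get? dF x = some base := by
      intro x hx
      simpa using hlev 0 L (by simp) x hx
    have hrest : ∀ (j : Nat) (Lj : List String), rest[j]? = some Lj →
        ∀ x ∈ Lj, PySem.Dict.get? dF x = some ((base + 1) + j) := by
      intro j Lj hj x hx
      have := hlev (j + 1) Lj (by simpa using hj) x hx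
      rw [this]; congr 1; omega
    rw [List.flatten_cons, List.filter_append]
    cases t with
    | zero =>
      have h1 : L.filter (fun x => PySem.Dict.getD dF x 0 == (base + 0)) = L := by
        apply List.filter_eq_self.mpr
        intro x hx
        rw [PySem.Dict.getD_eq_get?_getD, hL x hx]
        simp
      have h2 : rest.flatten.filter (fun x => PySem.Dict.getD dF x 0 == (base + 0)) = [] := by
        apply List.filter_eq_nil_iff.mpr
        intro x hx
        obtain ⟨Lj, hLj, hxLj⟩ := List.mem_flatten.mp hx
        obtain ⟨j, hjlt, hjv⟩ := List.mem_iff_getElem.mp hLj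
        have := hrest j Lj (by rw [List.getElem?_eq_getElem hjlt, hjv]) x hxLj
        rw [PySem.Dict.getD_eq_get?_getD, this]
        simp only [Option.getD_some, beq_iff_eq, decide_eq_true_eq]
        omega
      rw [h1, h2]
      simp
    | succ s =>
      have h1 : L.filter (fun x => PySem.Dict.getD dF x 0 == (base + (s + 1))) = [] := by
        apply List.filter_eq_nil_iff.mpr
        intro x hx
        rw [PySem.Dict.getD_eq_get?_getD, hL x hx]
        simp only [Option.getD_some, beq_iff_eq, decide_eq_true_eq]
        omega
      have h2 := ih dF (base + 1) hrest s (by simpa using ht)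
      rw [h1]
      simp only [show base + (s + 1) = (base + 1) + s from by omega]
      rw [h2]
      simp

-- the last element of the flattened layers lies in the last layer
theorem pvFlatten_getLast (Ls : List (List String)) :
    Ls ≠ [] → (∀ L ∈ Ls, L ≠ []) →
    ∃ x L, Ls[Ls.length - 1]? = some L ∧ x ∈ L ∧ Ls.flatten.getLast? = some x := by
  induction Ls with
  | nil => intro h _; exact absurd rfl h
  | cons L rest ih =>
    intro _ hne
    cases rest with
    | nil =>
      have hL : L ≠ [] := hne L (by simp)
      refine ⟨L.getLast hL, L, by simp, List.getLast_mem hL, ?_⟩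
      simp [List.getLast?_eq_some_getLast hL]
    | cons M rt =>
      obtain ⟨x, N, h1, h2, h3⟩ := ih (by simp) (fun K hK => hne K (List.mem_cons_of_mem _ hK))
      refine ⟨x, N, ?_, h2, ?_⟩
      · simpa using h1
      · rw [List.flatten_cons]
        rw [List.getLast?_append_of_ne_nil]
        · exact h3
        · intro e
          rw [e] at h3
          simp at h3

-- ===== VERDICT (by name: the statement is the Claim_ definition above) =====
theorem get_graph_layers_from_end_spec : Claim_equal_get_graph_layers_from_end := by
  intro graph reverse_graph _
  unfold Spec_get_graph_layers_from_end
  simp only [get_graph_layers_from_end, get_graph_layers_from_end_alt]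
  have hinv0 : pvInv PySem.Set.empty PySem.Dict.empty := by
    intro x
    constructor
    · intro hx; simp [PySem.Set.empty] at hx
    · intro hx
      rw [PySem.Dict.contains_eq_isSome_get?, PySem.Dict.get?_empty] at hx
      cases hx
  obtain ⟨ei, einv, elev⟩ := pvInit_equiv graph [] PySem.Set.empty PySem.Dict.empty hinv0
    (fun x hx => absurd hx List.not_mem_nil)
  set rg := PySem.Dict.mk reverse_graph with hrg
  set FA := graph.foldl
    (fun (st : List String × PySem.Set String) nd =>
      if nd.2.isEmpty then (st.1 ++ [nd.1], PySem.Set.add st.2 nd.1) else st)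
    ([], PySem.Set.empty) with hFA
  set FB := graph.foldl
    (fun (st : List String × PySem.Dict String Nat) nd =>
      if nd.2.isEmpty then (st.1 ++ [nd.1], PySem.Dict.insert st.2 nd.1 0) else st)
    ([], PySem.Dict.empty) with hFB
  rw [ei]
  by_cases hq : FA.1 = []
  · rw [hq, pvALoop_nil, pvBScan_nil]
    simp
  · obtain ⟨m1, m2, m3, m4⟩ := pvMain rg FA.1 FA.2 FB.2 0 einv elev
    set Ls := pvALoop rg FA.1 FA.2 with hLs
    set S := pvBScan rg FA.1 FB.2 with hS
    have hLsne : Ls ≠ [] := by rw [hLs, pvALoop_ne hq]; simp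
    have hRne : Ls.reverse ≠ [] := by simpa using hLsne
    have hmem : ∀ L ∈ Ls.reverse, L ≠ [] := fun L hL => m4 L (List.mem_reverse.mp hL)
    obtain ⟨x, L, h1, h2, h3⟩ := pvFlatten_getLast Ls.reverse hRne hmem
    have hofl : S.1 ≠ [] := by
      rw [m1]; intro e; rw [e] at h3; simp at h3
    have hempty : S.1.isEmpty = false := by
      cases hS1 : S.1
      · exact absurd hS1 hofl
      · rfl
    rw [hempty]
    simp only [Bool.false_eq_true, if_false]
    have hlast : S.1.getLast? = some x := by rw [m1]; exact h3
    have hxlev : PySem.Dict.get? S.2 x = some (0 + (Ls.reverse.length - 1)) :=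
      m3 (Ls.reverse.length - 1) L h1 x h2
    have hmax : PySem.Dict.getD S.2 (S.1.getLast?.getD "") 0 = Ls.length - 1 := by
      rw [hlast]
      simp only [Option.getD_some]
      rw [PySem.Dict.getD_eq_get?_getD, hxlev]
      simp
    rw [hmax]
    have hlen1 : 0 < Ls.length := List.length_pos_of_ne_nil hLsne
    have hK : Ls.length - 1 + 1 = Ls.length := by omega
    rw [hK]
    have hfil : ∀ t, t < Ls.length →
        S.1.filter (fun nd => PySem.Dict.getD S.2 nd 0 == t) = Ls.reverse.getD t [] := by
      intro t ht
      have hlev' : ∀ (j : Nat) (Lj : List String), Ls.reverse[j]? = some Lj →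
          ∀ y ∈ Lj, PySem.Dict.get? S.2 y = some (0 + j) := fun j Lj hj y hy => m3 j Lj hj y hy
      have := pvFilterFlatten Ls.reverse S.2 0 hlev' t (by simpa using ht)
      simp only [Nat.zero_add] at this
      rw [m1]
      exact this
    have hmap : (List.range Ls.length).map
        (fun lvl => S.1.filter (fun nd => PySem.Dict.getD S.2 nd 0 == lvl)) = Ls.reverse := by
      apply List.ext_getElem
      · simp
      · intro i hi1 hi2
        simp only [List.getElem_map, List.getElem_range]
        rw [hfil i (by simpa using hi1)]
        rw [List.getD_eq_getElem?_getD, List.getElem?_eq_getElem hi2]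
        rfl
    rw [List.map_reverse, hmap, List.reverse_reverse]
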